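-- pv_equiv track=rewrite | github.com/chilly003/Solved_Algorithm | baekjoon/1388/1388.py | find_board
-- ===== SOURCE A (Python) =====
-- def find_board(arr, idx, board):
--     total = 0
--     for i in arr:
--         temp = False #판자가 이어지는지 확인하는 참거짓짓
--         for j in range(idx):
--
--             #판자가 이어진다면 True
--             if i[j] == board:
--                 temp = True
--
--             #판자가 끊어진다면 total 더해주고 temp False
--             elif temp and i[j] != board:
--                 total += 1
--                 temp = False
--         #마지막 검사로 temp에 판자가 있는지 확인
--         if temp:
--             total += 1
--
--     return total
-- ===== SOURCE B (Python) =====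
-- def find_board(arr, idx, board):
--     # Inclusion-exclusion: a run of board-cells contributes (#cells) - (#adjacent joined pairs) = 1,
--     # so runs = (matching cells) - (adjacent pairs both matching). Two staged counts, no scan state.
--     total = 0
--     for i in arr:
--         matches = sum(1 for j in range(idx) if i[j] == board)
--         pairs = sum(1 for j in range(1, idx) if i[j - 1] == board and i[j] == board)
--         total += matches - pairs
--     return total
-- ===== Notes on version B (the rewrite author's own statement) =====
-- stated objective: alternative
-- what changed: B replaces A's stateful run-flag scan by an arithmetic identity: per row it counts matching cells and subtracts adjacent matching pairs (each maximal run of length k contributes k-(k-1)=1), so no scan state or end-of-row check is needed.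
import Mathlib
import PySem

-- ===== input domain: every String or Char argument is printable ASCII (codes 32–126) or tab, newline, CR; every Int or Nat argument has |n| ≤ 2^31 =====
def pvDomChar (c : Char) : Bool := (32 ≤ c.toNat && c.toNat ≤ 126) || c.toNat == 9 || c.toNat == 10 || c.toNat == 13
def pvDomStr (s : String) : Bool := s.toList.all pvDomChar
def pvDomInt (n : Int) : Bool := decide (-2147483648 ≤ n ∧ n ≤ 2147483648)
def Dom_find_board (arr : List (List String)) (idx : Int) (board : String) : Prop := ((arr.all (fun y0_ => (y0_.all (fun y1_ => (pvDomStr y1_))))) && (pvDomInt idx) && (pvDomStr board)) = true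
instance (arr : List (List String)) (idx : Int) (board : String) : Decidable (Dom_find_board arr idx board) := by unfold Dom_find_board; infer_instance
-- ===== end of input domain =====

-- B counts runs per row arithmetically (matching cells minus adjacent matching pairs) instead of A's run-flag scan; alternative decomposition, same cost.
-- Pre_ excludes only inputs where Python A raises IndexError (idx > some row's length).


-- ===== PORT A =====
def find_board (arr : List (List String)) (idx : Int) (board : String) : Int :=
  arr.foldl (fun total i =>
    let st := (PySem.List.pyRange 0 idx 1).foldl (fun (s : Bool × Int) j =>
      if PySem.List.pyGetD i j "" == board then (true, s.2)
      else if s.1 && !(PySem.List.pyGetD i j "" == board) then (false, s.2 + 1)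
      else (s.1, s.2)) (false, total)
    if st.1 then st.2 + 1 else st.2) 0

-- ===== PORT B =====
def find_board_alt (arr : List (List String)) (idx : Int) (board : String) : Int :=
  arr.foldl (fun total i =>
    let mcount := (PySem.List.pyRange 0 idx 1).foldl (fun (m : Int) j =>
      if PySem.List.pyGetD i j "" == board then m + 1 else m) 0
    let pcount := (PySem.List.pyRange 1 idx 1).foldl (fun (p : Int) j =>
      if (PySem.List.pyGetD i (j - 1) "" == board) && (PySem.List.pyGetD i j "" == board)
      then p + 1 else p) 0
    total + (mcount - pcount)) 0

-- ===== PRECONDITION & SPEC =====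
-- Pre_ excludes exactly the inputs where Python A raises IndexError: 0 < idx and some row shorter than idx.
def Pre_find_board (arr : List (List String)) (idx : Int) (board : String) : Prop :=
  idx ≤ 0 ∨ ∀ row ∈ arr, idx ≤ (row.length : Int)
instance (arr : List (List String)) (idx : Int) (board : String) : Decidable (Pre_find_board arr idx board) := by unfold Pre_find_board; infer_instance
def pvWitness_find_board : List (List String) × Int × String := ([["a", "b"], ["b", "b"]], 2, "b")
def Spec_find_board (arr : List (List String)) (idx : Int) (board : String) (out : Int) : Prop := out = find_board_alt arr idx board
instance (arr : List (List String)) (idx : Int) (board : String) (out : Int) : Decidable (Spec_find_board arr idx board out) := by unfold Spec_find_board; infer_instance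

-- ===== CLAIM =====
def Claim_equal_find_board : Prop := ∀ (arr : List (List String)) (idx : Int) (board : String), Dom_find_board arr idx board → Pre_find_board arr idx board → Spec_find_board arr idx board (find_board arr idx board)

-- ===== LEMMAS AND PROOFS =====

-- Per-row core: A's flag fold plus the trailing flag check equals
-- (matching cells) − (adjacent matching pairs); the flag records whether the last cell matched.
lemma pv_row_key (f : Int → String) (board : String) : ∀ (n : Nat) (t : Int),
    (let st := (PySem.List.pyRange 0 (n : Int) 1).foldl (fun (s : Bool × Int) j =>
        if f j == board then (true, s.2)
        else if s.1 && !(f j == board) then (false, s.2 + 1)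
        else (s.1, s.2)) (false, t)
     ((if st.1 then st.2 + 1 else st.2) =
        t + ((PySem.List.pyRange 0 (n : Int) 1).foldl (fun (m : Int) j =>
              if f j == board then m + 1 else m) 0
           - (PySem.List.pyRange 1 (n : Int) 1).foldl (fun (p : Int) j =>
              if (f (j - 1) == board) && (f j == board) then p + 1 else p) 0))
      ∧ st.1 = (decide (0 < n) && (f ((n : Int) - 1) == board))) := by
  intro n
  induction n with
  | zero =>
      intro t
      simp [PySem.List.pyRange_one_eq_nil]
  | succ n ih =>
      intro t
      have hM : PySem.List.pyRange 0 ((n + 1 : Nat) : Int) 1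
          = PySem.List.pyRange 0 (n : Int) 1 ++ [(n : Int)] := by
        push_cast
        exact PySem.List.pyRange_one_succ_right (by positivity)
      have hcast : ((n + 1 : Nat) : Int) - 1 = (n : Int) := by push_cast; ring
      rcases Nat.eq_zero_or_pos n with hn | hn
      · subst hn
        have h1 : PySem.List.pyRange 0 ((0 + 1 : Nat) : Int) 1 = [0] := by
          push_cast
          rw [PySem.List.pyRange_one_cons (by norm_num), PySem.List.pyRange_one_eq_nil (by norm_num)]
        have h2 : PySem.List.pyRange 1 ((0 + 1 : Nat) : Int) 1 = [] := by
          push_cast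
          exact PySem.List.pyRange_one_eq_nil (by norm_num)
        push_cast at h1 h2 ⊢
        by_cases hb : f 0 = board <;> simp [h1, h2, hb]
      · have hP : PySem.List.pyRange 1 ((n + 1 : Nat) : Int) 1
            = PySem.List.pyRange 1 (n : Int) 1 ++ [(n : Int)] := by
          push_cast
          exact PySem.List.pyRange_one_succ_right (by exact_mod_cast hn)
        rw [hM, hP, hcast]
        obtain ⟨ih1, ih2⟩ := ih t
        have hpos : decide (0 < n) = true := by simp; omega
        rw [hpos, Bool.true_and] at ih2
        simp only [List.foldl_append, List.foldl_cons, List.foldl_nil] at *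
        rcases hA : (PySem.List.pyRange 0 (n : Int) 1).foldl (fun (s : Bool × Int) j =>
            if f j == board then (true, s.2)
            else if s.1 && !(f j == board) then (false, s.2 + 1)
            else (s.1, s.2)) (false, t) with ⟨tm, tot⟩
        rw [hA] at ih1 ih2
        by_cases hb : (f (n : Int) == board) = true
        · refine ⟨?_, by simp [hb]⟩
          simp only [hb, if_true, Bool.and_true]
          by_cases hp : (f ((n : Int) - 1) == board) = true
          · rw [hp] at ih2; rw [ih2] at ih1
            simp only [if_true] at ih1
            simp only [hp, if_true]
            omega
          · have hp' : (f ((n : Int) - 1) == board) = false := by simpa using hp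
            rw [hp'] at ih2; rw [ih2] at ih1
            simp only [Bool.false_eq_true, if_false] at ih1
            simp only [hp', Bool.false_eq_true, if_false]
            omega
        · have hb' : (f (n : Int) == board) = false := by simpa using hb
          refine ⟨?_, ?_⟩
          · simp only [hb', Bool.false_eq_true, if_false, Bool.not_false, Bool.and_true,
              Bool.and_false]
            cases tm
            · simpa using ih1
            · simpa using ih1
          · simp only [hb', Bool.false_eq_true, if_false, Bool.not_false, Bool.and_true,
              Bool.and_false]
            cases tm <;> simp

lemma pv_row_eq (i : List String) (idx : Int) (board : String) (t : Int) :
    (let st := (PySem.List.pyRange 0 idx 1).foldl (fun (s : Bool × Int) j =>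
        if PySem.List.pyGetD i j "" == board then (true, s.2)
        else if s.1 && !(PySem.List.pyGetD i j "" == board) then (false, s.2 + 1)
        else (s.1, s.2)) (false, t)
     (if st.1 then st.2 + 1 else st.2)) =
    t + ((PySem.List.pyRange 0 idx 1).foldl (fun (m : Int) j =>
          if PySem.List.pyGetD i j "" == board then m + 1 else m) 0
       - (PySem.List.pyRange 1 idx 1).foldl (fun (p : Int) j =>
          if (PySem.List.pyGetD i (j - 1) "" == board) && (PySem.List.pyGetD i j "" == board)
          then p + 1 else p) 0) := by
  by_cases h : idx ≤ 0
  · simp [PySem.List.pyRange_one_eq_nil h, PySem.List.pyRange_one_eq_nil (by omega : idx ≤ 1)]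
  · have hidx : ((idx.toNat : Nat) : Int) = idx := by omega
    rw [← hidx]
    exact (pv_row_key (fun j => PySem.List.pyGetD i j "") board idx.toNat t).1

lemma pv_fold_aux (idx : Int) (board : String) : ∀ (arr : List (List String)) (t : Int),
    arr.foldl (fun total i =>
      let st := (PySem.List.pyRange 0 idx 1).foldl (fun (s : Bool × Int) j =>
        if PySem.List.pyGetD i j "" == board then (true, s.2)
        else if s.1 && !(PySem.List.pyGetD i j "" == board) then (false, s.2 + 1)
        else (s.1, s.2)) (false, total)
      if st.1 then st.2 + 1 else st.2) t =
    arr.foldl (fun total i =>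
      let mcount := (PySem.List.pyRange 0 idx 1).foldl (fun (m : Int) j =>
        if PySem.List.pyGetD i j "" == board then m + 1 else m) 0
      let pcount := (PySem.List.pyRange 1 idx 1).foldl (fun (p : Int) j =>
        if (PySem.List.pyGetD i (j - 1) "" == board) && (PySem.List.pyGetD i j "" == board)
        then p + 1 else p) 0
      total + (mcount - pcount)) t := by
  intro arr
  induction arr with
  | nil => intro t; rfl
  | cons i rest ih =>
      intro t
      simp only [List.foldl_cons]
      rw [pv_row_eq i idx board t]
      exact ih _

-- ===== VERDICT =====
theorem find_board_spec : Claim_equal_find_board := by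
  intro arr idx board _ _
  unfold Spec_find_board find_board find_board_alt
  exact pv_fold_aux idx board arr 0
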